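-- pv_equiv track=rewrite | github.com/BaoBao666888/Novel-Downloader5 | rename_chapters/app/core/translator.py | progressive_capitalizations
-- ===== SOURCE A (Python) =====
-- def progressive_capitalizations(s: str):
--     """Tạo các biến thể viết hoa cho một chuỗi."""
--     words = s.split()
--     if not words:
--         return []
--
--     lines = [s.lower()] # Dòng đầu không viết hoa
--     for i in range(1, len(words) + 1):
--         capitalized_part = ' '.join(w.capitalize() for w in words[:i])
--         remaining_part = ' '.join(words[i:]).lower()
--         lines.append(f"{capitalized_part} {remaining_part}".strip())
--     return lines
-- ===== SOURCE B (Python) =====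
-- def progressive_capitalizations(s: str):
--     """Progressive capitalization variants: one word list, capitalized in place."""
--     words = s.split()
--     if not words:
--         return []
--     cur = [w.lower() for w in words]
--     lines = [s.lower()]
--     for i, w in enumerate(words):
--         cur[i] = w.capitalize()
--         lines.append(' '.join(cur))
--     return lines
-- ===== Notes on version B (the rewrite author's own statement) =====
-- stated objective: alternative
-- what changed: B keeps a single word list (all-lowercased up front) and capitalizes one entry in place per step, joining that list once per line, instead of A's per-iteration re-slicing words[:i]/words[i:], re-capitalizing the whole prefix, re-joining and re-lowercasing the whole suffix and stripping the glued string.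
import Mathlib
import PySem

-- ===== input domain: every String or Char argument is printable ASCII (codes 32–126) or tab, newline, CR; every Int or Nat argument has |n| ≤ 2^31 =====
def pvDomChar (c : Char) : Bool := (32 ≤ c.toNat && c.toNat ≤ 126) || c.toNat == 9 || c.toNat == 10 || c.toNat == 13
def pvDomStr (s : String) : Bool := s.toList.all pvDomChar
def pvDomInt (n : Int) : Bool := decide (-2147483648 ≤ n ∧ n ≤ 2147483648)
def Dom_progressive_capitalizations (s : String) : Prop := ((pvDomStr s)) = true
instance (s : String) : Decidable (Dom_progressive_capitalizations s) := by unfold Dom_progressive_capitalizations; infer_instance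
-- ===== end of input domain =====

-- B maintains one word list, capitalizing one entry in place per step, instead of A's
-- re-slicing/re-joining/re-lowercasing of both halves each iteration (objective: alternative).

-- str.capitalize, exact on the ASCII domain: first char uppercased, rest lowercased
def capC (w : List Char) : List Char :=
  match w with
  | [] => []
  | c :: t => PySem.Chars.upperChar c :: PySem.Chars.lower t

-- ===== PORT A =====
def progressive_capitalizations (s : String) : List String :=
  let words := PySem.Chars.split₀ s.toList
  if words.isEmpty then []
  else
    ((PySem.List.pyRange 1 ((words.length : Int) + 1) 1).foldl
      (fun lines i =>
        let capitalized_part := PySem.Chars.join [' '] ((PySem.List.slice words none (some i)).map capC)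
        let remaining_part := PySem.Chars.lower (PySem.Chars.join [' '] (PySem.List.slice words (some i) none))
        lines ++ [PySem.Chars.strip (capitalized_part ++ [' '] ++ remaining_part)])
      [PySem.Chars.lower s.toList]).map String.ofList

-- ===== PORT B =====
def progressive_capitalizations_alt (s : String) : List String :=
  let words := PySem.Chars.split₀ s.toList
  if words.isEmpty then []
  else
    let st := (PySem.List.enumerate words 0).foldl
      (fun (st : List (List Char) × List (List Char)) iw =>
        let cur := st.1.set iw.1.toNat (capC iw.2)
        (cur, st.2 ++ [PySem.Chars.join [' '] cur]))
      (words.map PySem.Chars.lower, [PySem.Chars.lower s.toList])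
    st.2.map String.ofList

-- ===== PRECONDITION & SPEC =====
def Spec_progressive_capitalizations (s : String) (out : List String) : Prop := out = progressive_capitalizations_alt s
instance (s : String) (out : List String) : Decidable (Spec_progressive_capitalizations s out) := by unfold Spec_progressive_capitalizations; infer_instance

-- ===== CLAIM =====
def Claim_equal_progressive_capitalizations : Prop := ∀ (s : String), Dom_progressive_capitalizations s → Spec_progressive_capitalizations s (progressive_capitalizations s)

-- ===== LEMMAS AND PROOFS =====

-- a word produced by str.split(): nonempty, no whitespace characters
def pcWord (w : List Char) : Prop := w ≠ [] ∧ ∀ c ∈ w, PySem.Chars.isspace c = false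

-- the word list of B after k loop steps: first k capitalized, rest lowercased
def pcMix (ws : List (List Char)) (k : Nat) : List (List Char) :=
  (ws.take k).map capC ++ (ws.drop k).map PySem.Chars.lower

lemma upperChar_nonspace (c : Char) (h : PySem.Chars.isspace c = false) :
    PySem.Chars.isspace (PySem.Chars.upperChar c) = false := by
  unfold PySem.Chars.upperChar
  split
  · next hl =>
    simp only [PySem.Chars.islower, Bool.and_eq_true, decide_eq_true_eq] at hl
    have h1 : 97 ≤ c.toNat := Nat.succ_le_of_lt hl.1
    have h2 : c.toNat ≤ 122 := Nat.lt_succ_iff.mp (Nat.lt_succ_of_le hl.2)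
    have hv : (Char.ofNat (c.toNat - 32)).toNat = c.toNat - 32 := by
      have hval : Nat.isValidChar (c.toNat - 32) := Or.inl (by omega)
      simp [Char.toNat_ofNat, hval]
    simp only [PySem.Chars.isspace, hv]
    simp only [Bool.or_eq_false_iff, Bool.and_eq_false_iff, decide_eq_false_iff_not]
    omega
  · exact h

lemma lowerChar_nonspace (c : Char) (h : PySem.Chars.isspace c = false) :
    PySem.Chars.isspace (PySem.Chars.lowerChar c) = false := by
  unfold PySem.Chars.lowerChar
  split
  · next hl =>
    simp only [PySem.Chars.isupper, Bool.and_eq_true, decide_eq_true_eq] at hl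
    have h1 : 65 ≤ c.toNat := Nat.succ_le_of_lt hl.1
    have h2 : c.toNat ≤ 90 := Nat.lt_succ_iff.mp (Nat.lt_succ_of_le hl.2)
    have hv : (Char.ofNat (c.toNat + 32)).toNat = c.toNat + 32 := by
      have hval : Nat.isValidChar (c.toNat + 32) := Or.inl (by omega)
      simp [Char.toNat_ofNat, hval]
    simp only [PySem.Chars.isspace, hv]
    simp only [Bool.or_eq_false_iff, Bool.and_eq_false_iff, decide_eq_false_iff_not]
    omega
  · exact h

lemma pcWord_capC {w : List Char} (h : pcWord w) : pcWord (capC w) := by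
  obtain ⟨hne, hns⟩ := h
  cases w with
  | nil => exact absurd rfl hne
  | cons c t =>
    refine ⟨by simp [capC], ?_⟩
    intro d hd
    simp only [capC, List.mem_cons] at hd
    rcases hd with rfl | hd
    · exact upperChar_nonspace c (hns c (by simp))
    · simp only [PySem.Chars.lower, List.mem_map] at hd
      obtain ⟨e, he, rfl⟩ := hd
      exact lowerChar_nonspace e (hns e (by simp [he]))

lemma pcWord_lower {w : List Char} (h : pcWord w) : pcWord (PySem.Chars.lower w) := by
  obtain ⟨hne, hns⟩ := h
  refine ⟨by simpa [PySem.Chars.lower], ?_⟩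
  intro d hd
  simp only [PySem.Chars.lower, List.mem_map] at hd
  obtain ⟨e, he, rfl⟩ := hd
  exact lowerChar_nonspace e (hns e he)

lemma split₀_go_words (rest : List Char) : ∀ (cur : List Char) (acc : List (List Char)),
    (∀ c ∈ cur, PySem.Chars.isspace c = false) →
    (∀ w ∈ acc, pcWord w) →
    ∀ w ∈ PySem.Chars.split₀.go rest cur acc, pcWord w := by
  induction rest with
  | nil =>
    intro cur acc hcur hacc w hw
    simp only [PySem.Chars.split₀.go] at hw
    split at hw
    · exact hacc w (by simpa using hw)
    · next hne =>
      simp only [List.mem_reverse, List.mem_cons] at hw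
      rcases hw with rfl | hw
      · exact ⟨by simpa [List.isEmpty_iff] using hne, by simpa using hcur⟩
      · exact hacc w hw
  | cons c t ih =>
    intro cur acc hcur hacc w hw
    simp only [PySem.Chars.split₀.go] at hw
    split at hw
    · split at hw
      · exact ih [] acc (by simp) hacc w hw
      · next hne =>
        refine ih [] _ (by simp) ?_ w hw
        intro v hv
        rcases List.mem_cons.mp hv with rfl | hv
        · exact ⟨by simpa [List.isEmpty_iff] using hne, by simpa using hcur⟩
        · exact hacc v hv
    · next hsp =>
      refine ih (c :: cur) acc ?_ hacc w hw
      intro d hd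
      rcases List.mem_cons.mp hd with rfl | hd
      · simpa using hsp
      · exact hcur d hd

lemma split₀_words {s : List Char} : ∀ w ∈ PySem.Chars.split₀ s, pcWord w :=
  split₀_go_words s [] [] (by simp) (by simp)

lemma lower_join (ps : List (List Char)) :
    PySem.Chars.lower (PySem.Chars.join [' '] ps) = PySem.Chars.join [' '] (ps.map PySem.Chars.lower) := by
  induction ps with
  | nil => simp [PySem.Chars.join_nil, PySem.Chars.lower]
  | cons p t ih =>
    cases t with
    | nil => simp [PySem.Chars.join_singleton]
    | cons q r =>
      simp only [List.map_cons] at ih ⊢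
      rw [PySem.Chars.join_cons_cons, PySem.Chars.join_cons_cons]
      simp only [PySem.Chars.lower, List.map_append, List.map_cons] at ih ⊢
      simp [ih, show PySem.Chars.lowerChar ' ' = ' ' from by decide]

lemma join_append (as bs : List (List Char)) (ha : as ≠ []) (hb : bs ≠ []) :
    PySem.Chars.join [' '] (as ++ bs) = PySem.Chars.join [' '] as ++ [' '] ++ PySem.Chars.join [' '] bs := by
  induction as with
  | nil => exact absurd rfl ha
  | cons p t ih =>
    cases t with
    | nil =>
      cases bs with
      | nil => exact absurd rfl hb
      | cons q r => simp [PySem.Chars.join_cons_cons, PySem.Chars.join_singleton]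
    | cons q r =>
      have ih' := ih (by simp)
      simp only [List.cons_append] at ih' ⊢
      rw [PySem.Chars.join_cons_cons, ih', PySem.Chars.join_cons_cons]
      simp

lemma join_head (p : List Char) (ps : List (List Char)) :
    ∃ r, PySem.Chars.join [' '] (p :: ps) = p ++ r := by
  cases ps with
  | nil => exact ⟨[], by simp [PySem.Chars.join_singleton]⟩
  | cons q r =>
    exact ⟨' ' :: PySem.Chars.join [' '] (q :: r), by rw [PySem.Chars.join_cons_cons]; simp⟩

lemma join_last (ps : List (List Char)) (h : ps ≠ []) (hw : ∀ p ∈ ps, pcWord p) :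
    ∃ l w, pcWord w ∧ PySem.Chars.join [' '] ps = l ++ w := by
  induction ps with
  | nil => exact absurd rfl h
  | cons p t ih =>
    cases t with
    | nil => exact ⟨[], p, hw p (by simp), by simp [PySem.Chars.join_singleton]⟩
    | cons q r =>
      obtain ⟨l, w, hwword, heq⟩ := ih (by simp) (fun x hx => hw x (by simp [hx]))
      exact ⟨p ++ [' '] ++ l, w, hwword, by rw [PySem.Chars.join_cons_cons, heq]; simp⟩

lemma lstrip_word (w r : List Char) (h : pcWord w) :
    PySem.Chars.lstrip (w ++ r) = w ++ r := by
  obtain ⟨hne, hns⟩ := h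
  cases w with
  | nil => exact absurd rfl hne
  | cons c t =>
    simp only [PySem.Chars.lstrip, List.cons_append, List.dropWhile_cons]
    rw [hns c (by simp)]
    simp

lemma rstrip_word (l w : List Char) (h : pcWord w) :
    PySem.Chars.rstrip (l ++ w) = l ++ w := by
  obtain ⟨hne, hns⟩ := h
  obtain ⟨t, c, rfl⟩ := w.eq_nil_or_concat.resolve_left hne
  have hc : PySem.Chars.isspace c = false := hns c (by simp)
  simp only [PySem.Chars.rstrip, List.concat_eq_append]
  rw [show (l ++ (t ++ [c])).reverse = c :: (t.reverse ++ l.reverse) by simp]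
  rw [List.dropWhile_cons, hc]
  simp

lemma rstrip_word_space (l w : List Char) (h : pcWord w) :
    PySem.Chars.rstrip (l ++ w ++ [' ']) = l ++ w := by
  obtain ⟨hne, hns⟩ := h
  obtain ⟨t, c, rfl⟩ := w.eq_nil_or_concat.resolve_left hne
  have hc : PySem.Chars.isspace c = false := hns c (by simp)
  simp only [PySem.Chars.rstrip, List.concat_eq_append]
  rw [show (l ++ (t ++ [c]) ++ [' ']).reverse = ' ' :: c :: (t.reverse ++ l.reverse) by simp]
  rw [List.dropWhile_cons, show PySem.Chars.isspace ' ' = true from by decide]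
  simp only [if_true]
  rw [List.dropWhile_cons, hc]
  simp

lemma strip_join (as bs : List (List Char)) (ha : as ≠ []) (hwa : ∀ p ∈ as, pcWord p)
    (hwb : ∀ p ∈ bs, pcWord p) :
    PySem.Chars.strip (PySem.Chars.join [' '] as ++ [' '] ++ PySem.Chars.join [' '] bs)
      = PySem.Chars.join [' '] (as ++ bs) := by
  obtain ⟨p, t, rfl⟩ := List.exists_cons_of_ne_nil ha
  obtain ⟨r, hr⟩ := join_head p t
  have hp : pcWord p := hwa p (by simp)
  cases bs with
  | nil =>
    obtain ⟨l, w, hwword, heq⟩ := join_last (p :: t) (by simp) hwa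
    simp only [PySem.Chars.join_nil, List.append_nil]
    unfold PySem.Chars.strip
    rw [hr, show p ++ r ++ [' '] = p ++ (r ++ [' ']) from by simp, lstrip_word _ _ hp,
        show p ++ (r ++ [' ']) = (p ++ r) ++ [' '] from by simp, ← hr, heq, rstrip_word_space _ _ hwword]
  | cons q u =>
    rw [join_append (p :: t) (q :: u) (by simp) (by simp)]
    obtain ⟨l, w, hwword, heq⟩ := join_last (q :: u) (by simp) hwb
    unfold PySem.Chars.strip
    rw [hr, show p ++ r ++ [' '] ++ PySem.Chars.join [' '] (q :: u)
          = p ++ (r ++ [' '] ++ PySem.Chars.join [' '] (q :: u)) from by simp,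
        lstrip_word _ _ hp]
    rw [show p ++ (r ++ [' '] ++ PySem.Chars.join [' '] (q :: u))
          = (p ++ r ++ [' ']) ++ PySem.Chars.join [' '] (q :: u) from by simp, heq,
        show (p ++ r ++ [' ']) ++ (l ++ w) = (p ++ r ++ [' '] ++ l) ++ w from by simp,
        rstrip_word _ _ hwword]

lemma pyRange_map {α : Type} (g : Int → α) (n : Nat) :
    (PySem.List.pyRange 1 ((n : Int) + 1) 1).map g
      = (List.range' 1 n).map (fun (j : Nat) => g ((j : Nat) : Int)) := by
  induction n with
  | zero => simp [PySem.List.pyRange]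
  | succ m ih =>
    have h1 : (1 : Int) ≤ (m : Int) + 1 := by omega
    have hc : ((m + 1 : Nat) : Int) + 1 = ((m : Int) + 1) + 1 := by push_cast; ring
    rw [hc, PySem.List.pyRange_one_succ_right h1, List.range'_concat, List.map_append,
        List.map_append, ih]
    simp
    congr 1
    omega

lemma pcMix_set {ws : List (List Char)} {k : Nat} {w : List Char} {rest : List (List Char)}
    (h : ws.drop k = w :: rest) :
    (pcMix ws k).set k (capC w) = pcMix ws (k + 1) := by
  have hk : k < ws.length := by
    by_contra hc
    rw [List.drop_eq_nil_of_le (by omega)] at h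
    exact absurd h (by simp)
  have hlen : ((ws.take k).map capC).length = k := by
    simp [List.length_take, Nat.min_eq_left (Nat.le_of_lt hk)]
  unfold pcMix
  rw [List.set_append]
  rw [hlen]
  simp only [lt_irrefl, if_false, Nat.sub_self]
  rw [h]
  have hget : ws[k]? = some w := by
    have h0 : (ws.drop k)[0]? = some w := by rw [h]; rfl
    rw [List.getElem?_drop] at h0
    simpa using h0
  have hdrop : ws.drop (k + 1) = rest := by
    rw [← List.tail_drop, h]
    rfl
  rw [List.take_add_one, hget, hdrop]
  simp

lemma B_inv (ws : List (List Char)) : ∀ (d k : Nat) (acc : List (List Char)),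
    ws.length - k = d → k ≤ ws.length →
    (PySem.List.enumerate (ws.drop k) (k : Int)).foldl
      (fun (st : List (List Char) × List (List Char)) iw =>
        let cur := st.1.set iw.1.toNat (capC iw.2)
        (cur, st.2 ++ [PySem.Chars.join [' '] cur]))
      (pcMix ws k, acc)
    = (pcMix ws ws.length,
       acc ++ (List.range' (k + 1) (ws.length - k)).map (fun j => PySem.Chars.join [' '] (pcMix ws j))) := by
  intro d
  induction d with
  | zero =>
    intro k acc hd hk
    have hk' : k = ws.length := by omega
    subst hk'
    simp [PySem.List.enumerate_nil]
  | succ m ih =>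
    intro k acc hd hk
    have hklt : k < ws.length := by omega
    have hdrop : ws.drop k = ws[k] :: ws.drop (k + 1) := List.drop_eq_getElem_cons hklt
    rw [hdrop, PySem.List.enumerate_cons, List.foldl_cons]
    show List.foldl _
      ((pcMix ws k).set (k : Int).toNat (capC ws[k]),
        acc ++ [PySem.Chars.join [' '] ((pcMix ws k).set (k : Int).toNat (capC ws[k]))])
      (PySem.List.enumerate (ws.drop (k + 1)) ((k : Int) + 1)) = _
    have hset : (pcMix ws k).set (k : Int).toNat (capC ws[k]) = pcMix ws (k + 1) := by
      rw [Int.toNat_natCast]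
      exact pcMix_set hdrop
    rw [hset]
    have hcast : (k : Int) + 1 = ((k + 1 : Nat) : Int) := by push_cast; ring
    rw [hcast]
    rw [ih (k + 1) _ (by omega) (by omega)]
    have hr : ws.length - k = (ws.length - (k + 1)) + 1 := by omega
    rw [hr, List.range'_succ]
    simp

lemma lineA_eq (ws : List (List Char)) (j : Nat) (h1 : 1 ≤ j) (h2 : j ≤ ws.length)
    (hw : ∀ w ∈ ws, pcWord w) :
    PySem.Chars.strip
      (PySem.Chars.join [' '] ((ws.take j).map capC) ++ [' ']
        ++ PySem.Chars.lower (PySem.Chars.join [' '] (ws.drop j)))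
      = PySem.Chars.join [' '] (pcMix ws j) := by
  rw [lower_join]
  have hne : (ws.take j).map capC ≠ [] := by
    have : ws ≠ [] := by
      intro h; subst h; simp at h2; omega
    simp [List.take_eq_nil_iff]
    constructor <;> [omega; exact this]
  rw [strip_join _ _ hne ?_ ?_]
  · rfl
  · intro p hp
    obtain ⟨w, hwmem, rfl⟩ := List.mem_map.mp hp
    exact pcWord_capC (hw w (List.mem_of_mem_take hwmem))
  · intro p hp
    obtain ⟨w, hwmem, rfl⟩ := List.mem_map.mp hp
    exact pcWord_lower (hw w (List.mem_of_mem_drop hwmem))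

lemma main_eq (s : String) : progressive_capitalizations s = progressive_capitalizations_alt s := by
  unfold progressive_capitalizations progressive_capitalizations_alt
  by_cases h : (PySem.Chars.split₀ s.toList).isEmpty
  · simp only [h, if_true]
  · simp only [h, Bool.false_eq_true, if_false]
    have hw : ∀ w ∈ PySem.Chars.split₀ s.toList, pcWord w := split₀_words
    refine congrArg (List.map String.ofList) ?_
    rw [PySem.List.foldl_append_singleton_eq_map
      (f := fun i => PySem.Chars.strip
        (PySem.Chars.join [' '] ((PySem.List.slice (PySem.Chars.split₀ s.toList) none (some i)).map capC) ++ [' ']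
          ++ PySem.Chars.lower (PySem.Chars.join [' '] (PySem.List.slice (PySem.Chars.split₀ s.toList) (some i) none))))]
    rw [pyRange_map]
    have hB := B_inv (PySem.Chars.split₀ s.toList) (PySem.Chars.split₀ s.toList).length 0
      [PySem.Chars.lower s.toList] (by omega) (by omega)
    rw [show List.drop 0 (PySem.Chars.split₀ s.toList) = PySem.Chars.split₀ s.toList from rfl] at hB
    rw [show ((0 : Nat) : Int) = (0 : Int) from rfl] at hB
    rw [show pcMix (PySem.Chars.split₀ s.toList) 0
          = (PySem.Chars.split₀ s.toList).map PySem.Chars.lower from rfl] at hB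
    rw [hB]
    simp only [Nat.sub_zero, Nat.zero_add]
    apply congrArg
    apply List.map_congr_left
    intro j hj
    rw [List.mem_range'_1] at hj
    obtain ⟨hj1, hj2⟩ := hj
    rw [PySem.List.slice_to _ (by positivity), PySem.List.slice_from _ (by positivity),
        Int.toNat_natCast]
    exact lineA_eq _ j hj1 (by omega) hw

-- ===== VERDICT =====
theorem progressive_capitalizations_spec : Claim_equal_progressive_capitalizations := by
  intro s _
  unfold Spec_progressive_capitalizations
  exact main_eq s
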